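-- pv_equiv track=rewrite | github.com/lucio-karin0506/algorism-study | backjoon/dfs_bfs/S5_바닥장식.py | solution
-- ===== SOURCE A (Python) =====
-- def solution(graph, N, M):
--     count = 0
--
--     # check -
--     for i in range(N):
--         pre = '/'
--         for j in range(M):
--             # - 일 경우 count 증가
--             if graph[i][j] == '-':
--                 # 같은 모양일 경우, count 제외 ==> 이전 타일 모양과 다를 때만 확인 위함
--                 if graph[i][j] != pre:
--                     count += 1
--
--             # 이전 타일 모양 정보 저장 => 다음 타일 모양과의 일치 여부 비교 위함
--             pre = graph[i][j]
--
--     # check |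
--     for j in range(M):
--         pre = '/'
--         for i in range(N):
--             # | 일 경우 count 증가
--             if graph[i][j] == '|':
--                 if graph[i][j] != pre:
--                     count += 1
--
--             pre = graph[i][j]
--
--     return count
-- ===== SOURCE B (Python) =====
-- def solution(graph, N, M):
--     # runs = cells - adjacent same-symbol pairs, computed per row / per column
--     g = [row[:max(M, 0)] for row in graph[:max(N, 0)]]
--
--     def score(rows, c):
--         total = 0
--         for row in rows:
--             total += row.count(c)
--             total -= sum(1 for a, b in zip(row, row[1:]) if a == c and b == c)
--         return total
--
--     cols = [list(col) for col in zip(*g)]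
--     return score(g, '-') + score(cols, '|')
-- ===== Notes on version B (the rewrite author's own statement) =====
-- stated objective: alternative
-- what changed: Replaces A's stateful run-detection (a 'pre' flag carried through nested index loops twice over the grid) by the identity runs = cells - adjacent-equal pairs: B trims the grid once, counts '-' cells minus horizontal '-' pairs per row, transposes, and counts '|' cells minus vertical '|' pairs per column.
import Mathlib
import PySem

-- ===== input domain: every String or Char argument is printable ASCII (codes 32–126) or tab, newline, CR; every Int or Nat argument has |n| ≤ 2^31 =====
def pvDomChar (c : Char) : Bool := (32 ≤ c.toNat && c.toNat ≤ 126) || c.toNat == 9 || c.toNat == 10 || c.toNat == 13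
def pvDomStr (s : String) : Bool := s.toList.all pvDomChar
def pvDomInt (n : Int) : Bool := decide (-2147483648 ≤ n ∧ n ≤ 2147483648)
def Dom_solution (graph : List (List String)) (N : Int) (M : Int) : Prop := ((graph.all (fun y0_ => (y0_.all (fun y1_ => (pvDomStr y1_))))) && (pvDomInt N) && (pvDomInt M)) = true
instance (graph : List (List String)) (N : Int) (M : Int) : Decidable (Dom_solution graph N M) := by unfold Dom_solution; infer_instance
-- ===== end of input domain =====

-- B replaces A's stateful run-detection ('pre' flag in nested index loops) by the identity
-- runs = cells - adjacent-equal pairs over the trimmed grid and its transpose (objective: alternative).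


-- ===== PORT A =====
-- one iteration of A's inner loops: state (count, pre), cell x
def stepRun (c : String) (x : String) (st : Int × String) : Int × String :=
  (if x = c then (if x ≠ st.2 then st.1 + 1 else st.1) else st.1, x)

def solution (graph : List (List String)) (N : Int) (M : Int) : Int :=
  -- check '-' : for i in range(N): pre = '/'; for j in range(M): …
  let count : Int :=
    (PySem.List.pyRange 0 N 1).foldl (fun count i =>
      ((PySem.List.pyRange 0 M 1).foldl
        (fun st j => stepRun "-" (PySem.List.pyGetD (PySem.List.pyGetD graph i []) j "") st)
        (count, "/")).1) 0
  -- check '|' : for j in range(M): pre = '/'; for i in range(N): …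
  (PySem.List.pyRange 0 M 1).foldl (fun count j =>
    ((PySem.List.pyRange 0 N 1).foldl
      (fun st i => stepRun "|" (PySem.List.pyGetD (PySem.List.pyGetD graph i []) j "") st)
      (count, "/")).1) count

-- ===== PORT B =====
-- zip(*rows): truncating transpose; fuel = length of the first row bounds the output length
def pyZipStar (fuel : Nat) (rows : List (List String)) : List (List String) :=
  match fuel with
  | 0 => []
  | fuel + 1 =>
    if rows.isEmpty || rows.any (·.isEmpty) then []
    else rows.map (fun r => r.headD "") :: pyZipStar fuel (rows.map (·.tail))

-- score(rows, c) = sum over rows of (row.count(c) - #adjacent (c,c) pairs in row)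
def scoreB (rows : List (List String)) (c : String) : Int :=
  rows.foldl (fun total row =>
    total + (PySem.List.count row c : Int)
          - ((row.zip row.tail).countP (fun p => p.1 = c && p.2 = c) : Int)) 0

def solution_alt (graph : List (List String)) (N : Int) (M : Int) : Int :=
  let g := (PySem.List.slice graph none (some (max N 0))).map (fun row =>
    PySem.List.slice row none (some (max M 0)))
  let cols := pyZipStar (g.headD []).length g
  scoreB g "-" + scoreB cols "|"

-- ===== PRECONDITION & SPEC =====
-- Pre_ excludes exactly the inputs where A raises IndexError: with N,M > 0 it needs
-- at least N rows each (among the first N) of length at least M.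
def Pre_solution (graph : List (List String)) (N : Int) (M : Int) : Prop :=
  N ≤ 0 ∨ M ≤ 0 ∨ (N ≤ graph.length ∧ ∀ row ∈ graph.take N.toNat, M ≤ row.length)
instance (graph : List (List String)) (N : Int) (M : Int) : Decidable (Pre_solution graph N M) := by
  unfold Pre_solution; infer_instance

def pvWitness_solution : List (List String) × Int × Int := ([["-", "-"], ["|", "-"]], 2, 2)

def Spec_solution (graph : List (List String)) (N : Int) (M : Int) (out : Int) : Prop := out = solution_alt graph N M
instance (graph : List (List String)) (N : Int) (M : Int) (out : Int) : Decidable (Spec_solution graph N M out) := by unfold Spec_solution; infer_instance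

-- ===== CLAIM (what is proved, stated in full; the proofs are below) =====
def Claim_equal_solution : Prop := ∀ (graph : List (List String)) (N : Int) (M : Int), Dom_solution graph N M → Pre_solution graph N M → Spec_solution graph N M (solution graph N M)


-- ===== LEMMAS AND PROOFS =====

-- number of starts of c-runs in l when the previous cell was pre
def runsC (c : String) : String → List String → Int
  | _, [] => 0
  | pre, x :: xs => (if x = c ∧ x ≠ pre then 1 else 0) + runsC c x xs

-- number of occurrences of c (as Int)
def cntC (c : String) (l : List String) : Int := (l.count c : Int)

-- number of adjacent (c, c) pairs
def prsC (c : String) : List String → Int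
  | [] => 0
  | [_] => 0
  | x :: y :: xs => (if x = c ∧ y = c then 1 else 0) + prsC c (y :: xs)

theorem stepRun_eq (c x : String) (st : Int × String) :
    stepRun c x st = (st.1 + (if x = c ∧ x ≠ st.2 then 1 else 0), x) := by
  unfold stepRun; split_ifs <;> simp_all

theorem foldl_stepRun {α : Type} (c : String) (cf : α → String) :
    ∀ (js : List α) (count : Int) (pre : String),
      js.foldl (fun st j => stepRun c (cf j) st) (count, pre)
        = (count + runsC c pre (js.map cf), (js.map cf).getLastD pre) := by
  intro js
  induction js with
  | nil => intro count pre; simp [runsC]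
  | cons j js ih =>
    intro count pre
    rw [List.foldl_cons,
      show stepRun c (cf j) (count, pre)
        = (count + (if cf j = c ∧ cf j ≠ pre then 1 else 0), cf j) from stepRun_eq c (cf j) (count, pre),
      ih]
    simp only [List.map_cons, runsC, List.getLastD_cons, Prod.mk.injEq]
    exact ⟨by ring, trivial⟩

theorem runsC_eq (c : String) : ∀ (l : List String) (pre : String),
    runsC c pre l = cntC c l - prsC c (pre :: l) := by
  intro l
  induction l with
  | nil => intro pre; simp [runsC, cntC, prsC]
  | cons x xs ih =>
    intro pre
    simp only [runsC, ih x, cntC, prsC, List.count_cons]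
    push_cast
    by_cases hx : x = c
    · by_cases hp : pre = c
      · have hxp : x = pre := hx.trans hp.symm
        simp [hx, hp]
        omega
      · have hxp : x ≠ pre := fun h => hp (h.symm.trans hx)
        simp [hx, hp]
        rw [if_neg (fun h => hp (h.symm : pre = c))]
        omega
    · simp [hx]

theorem runsC_slash (c : String) (hc : c ≠ "/") (l : List String) :
    runsC c "/" l = cntC c l - prsC c l := by
  rw [runsC_eq]
  cases l with
  | nil => simp [prsC]
  | cons x xs =>
    have : ¬("/" = c ∧ x = c) := by rintro ⟨h, _⟩; exact hc h.symm
    simp [prsC, this]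

theorem prsC_eq_zip (c : String) : ∀ (l : List String),
    ((l.zip l.tail).countP (fun p => p.1 = c && p.2 = c) : Int) = prsC c l := by
  intro l
  induction l with
  | nil => simp [prsC]
  | cons x xs ih =>
    cases xs with
    | nil => simp [prsC]
    | cons y ys =>
      simp only [List.tail_cons, List.zip_cons_cons, List.countP_cons] at ih ⊢
      rw [show prsC c (x :: y :: ys) = (if x = c ∧ y = c then 1 else 0) + prsC c (y :: ys) from rfl,
        ← ih]
      push_cast
      by_cases hx : x = c <;> by_cases hy : y = c <;> simp [hx, hy] <;> omega

theorem scoreB_eq (c : String) : ∀ (rows : List (List String)) (a : Int),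
    rows.foldl (fun total row =>
      total + (PySem.List.count row c : Int)
            - ((row.zip row.tail).countP (fun p => p.1 = c && p.2 = c) : Int)) a
      = a + (rows.map (fun row => cntC c row - prsC c row)).sum := by
  intro rows
  induction rows with
  | nil => intro a; simp
  | cons r rs ih =>
    intro a
    rw [List.foldl_cons, ih]
    have hc : (PySem.List.count r c : Int) = cntC c r := by
      simp [PySem.List.count_eq, cntC]
    rw [prsC_eq_zip c r, hc, List.map_cons, List.sum_cons]
    ring

theorem getD_zero_headD (r : List String) : r.getD 0 "" = r.headD "" := by
  cases r <;> simp

theorem getD_succ_tail (r : List String) (j : Nat) : r.getD (j + 1) "" = r.tail.getD j "" := by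
  cases r <;> simp

theorem pyZipStar_eq (m : Nat) : ∀ (rows : List (List String)), rows ≠ [] →
    (∀ r ∈ rows, r.length = m) →
    pyZipStar m rows = (List.range m).map (fun j => rows.map (fun r => r.getD j "")) := by
  induction m with
  | zero => intro rows _ _; simp [pyZipStar]
  | succ m ih =>
    intro rows hne hlen
    have hany : rows.any (·.isEmpty) = false := by
      simp only [List.any_eq_false]
      intro r hr
      have := hlen r hr
      simp [List.isEmpty_iff]
      intro h; rw [h] at this; simp at this
    have hemp : rows.isEmpty = false := by simpa [List.isEmpty_iff] using hne
    rw [pyZipStar, hemp, hany]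
    simp only [Bool.or_self, if_neg Bool.false_ne_true]
    rw [ih (rows.map (·.tail)) (by simpa using hne)
      (by intro r hr; simp at hr; obtain ⟨s, hs, rfl⟩ := hr
          have := hlen s hs; simp [this])]
    rw [List.range_succ_eq_map]
    simp only [List.map_cons, List.map_map]
    refine List.cons_eq_cons.mpr ⟨?_, ?_⟩
    · exact List.map_congr_left (fun r _ => (getD_zero_headD r).symm)
    · apply List.map_congr_left
      intro j _
      simp only [Function.comp]
      exact List.map_congr_left (fun r _ => (getD_succ_tail r j).symm)

theorem take_eq_map_range {α : Type} (l : List α) (d : α) (n : Nat) (h : n ≤ l.length) :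
    l.take n = (List.range n).map (fun k => l.getD k d) := by
  apply List.ext_getElem
  · simp; omega
  · intro k h1 h2
    simp only [List.getElem_take, List.getElem_map, List.getElem_range]
    have hk : k < n := by simpa using h2
    rw [List.getD_eq_getElem l d (by omega)]

-- the common normal form: runs of the trimmed grid, rows then columns
theorem solution_eq_sum (graph : List (List String)) (N M : Int) :
    solution graph N M =
      ((List.range N.toNat).map (fun k =>
        runsC "-" "/" ((List.range M.toNat).map (fun j => (graph.getD k []).getD j "")))).sum
      + ((List.range M.toNat).map (fun j =>
        runsC "|" "/" ((List.range N.toNat).map (fun k => (graph.getD k []).getD j "")))).sum := by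
  unfold solution
  simp [PySem.List.pyRange_one, List.foldl_map, foldl_stepRun, PySem.List.foldl_add,
    PySem.List.pyGetD_natCast]

theorem solution_alt_eq_sum (graph : List (List String)) (N M : Int) (hN : 0 < N) (hM : 0 < M)
    (hlen : N ≤ graph.length) (hrow : ∀ row ∈ graph.take N.toNat, M ≤ row.length) :
    solution_alt graph N M =
      ((List.range N.toNat).map (fun k =>
        cntC "-" ((List.range M.toNat).map (fun j => (graph.getD k []).getD j ""))
        - prsC "-" ((List.range M.toNat).map (fun j => (graph.getD k []).getD j "")))).sum
      + ((List.range M.toNat).map (fun j =>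
        cntC "|" ((List.range N.toNat).map (fun k => (graph.getD k []).getD j ""))
        - prsC "|" ((List.range N.toNat).map (fun k => (graph.getD k []).getD j "")))).sum := by
  have hn0 : (0 : Int) ≤ N := le_of_lt hN
  have hnn : (N.toNat : Int) = N := Int.toNat_of_nonneg hn0
  have hmm : (M.toNat : Int) = M := Int.toNat_of_nonneg (le_of_lt hM)
  have hrowlen : ∀ k < N.toNat, M.toNat ≤ (graph.getD k []).length := by
    intro k hk
    have hklen : k < graph.length := by omega
    have hmem : graph.getD k [] ∈ graph.take N.toNat := by
      rw [List.getD_eq_getElem _ _ hklen,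
        show graph[k] = (graph.take N.toNat)[k]'(by simp; omega) from (List.getElem_take).symm]
      exact List.getElem_mem _
    have := hrow _ hmem
    omega
  have hg : ((PySem.List.slice graph none (some (max N 0))).map (fun row =>
      PySem.List.slice row none (some (max M 0))))
      = (List.range N.toNat).map (fun k =>
          (List.range M.toNat).map (fun j => (graph.getD k []).getD j "")) := by
    rw [max_eq_left hn0, PySem.List.slice_to _ hn0,
      take_eq_map_range graph ([] : List String) N.toNat (by omega), List.map_map]
    apply List.map_congr_left
    intro k hk
    simp only [Function.comp]
    rw [max_eq_left (by omega), PySem.List.slice_to _ (le_of_lt hM)]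
    have : M.toNat = (M.toNat : Int).toNat := by omega
    rw [hmm] at this
    rw [← this]
    exact take_eq_map_range _ "" _ (hrowlen k (List.mem_range.mp hk))
  simp only [solution_alt]
  rw [hg]
  have hfuel : (((List.range N.toNat).map (fun k =>
      (List.range M.toNat).map (fun j => (graph.getD k []).getD j ""))).headD []).length
      = M.toNat := by
    obtain ⟨n', hn'⟩ : ∃ n', N.toNat = n' + 1 := ⟨N.toNat - 1, by omega⟩
    rw [hn', List.range_succ_eq_map]
    simp
  rw [hfuel]
  rw [pyZipStar_eq M.toNat _
    (by
      obtain ⟨n', hn'⟩ : ∃ n', N.toNat = n' + 1 := ⟨N.toNat - 1, by omega⟩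
      rw [hn', List.range_succ_eq_map]
      simp)
    (by intro r hr; simp at hr; obtain ⟨k, _, rfl⟩ := hr; simp)]
  simp only [scoreB, scoreB_eq, List.map_map, zero_add]
  congr 2
  apply List.map_congr_left
  intro j hj
  simp only [Function.comp]
  have hcol : (List.range N.toNat).map
      ((fun r => r.getD j "") ∘ fun k =>
        List.map (fun j' => (graph.getD k []).getD j' "") (List.range M.toNat))
      = (List.range N.toNat).map (fun k => (graph.getD k []).getD j "") := by
    apply List.map_congr_left
    intro k _
    simp only [Function.comp]
    exact PySem.List.getD_map_range _ _ _ "" (List.mem_range.mp hj)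
  rw [hcol]

theorem main_eq (graph : List (List String)) (N M : Int) (hpre : Pre_solution graph N M) :
    solution graph N M = solution_alt graph N M := by
  by_cases hN : N ≤ 0
  · have hmaxN : max N 0 = 0 := by omega
    simp [solution, solution_alt, scoreB, PySem.List.pyRange_one_eq_nil hN, foldl_stepRun,
      pyZipStar, List.foldl_fixed, hmaxN, PySem.List.slice_to]
  · by_cases hM : M ≤ 0
    · have hmax : max M 0 = 0 := by omega
      have hg0 : ((PySem.List.slice graph none (some (max N 0))).map (fun row =>
          PySem.List.slice row none (some (max M 0))))
          = List.replicate (graph.take N.toNat).length ([] : List String) := by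
        rw [hmax, show max N 0 = N from max_eq_left (by omega),
          PySem.List.slice_to _ (by omega : (0:Int) ≤ N)]
        simp [PySem.List.slice_to]
      have hsol : solution graph N M = 0 := by
        simp [solution, PySem.List.pyRange_one_eq_nil hM, foldl_stepRun,
          List.foldl_fixed]
      rw [hsol]
      simp only [solution_alt]
      rw [hg0]
      have hhead : (List.replicate (graph.take N.toNat).length ([] : List String)).headD [] = [] := by
        cases h : (graph.take N.toNat).length <;> simp [List.replicate_succ]
      rw [hhead]
      simp only [scoreB, scoreB_eq]
      simp [cntC, prsC, pyZipStar]
    · have h1 : 0 < N := by omega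
      have h2 : 0 < M := by omega
      have hpre' : N ≤ graph.length ∧ ∀ row ∈ graph.take N.toNat, M ≤ row.length := by
        rcases hpre with h | h | h
        · omega
        · omega
        · exact h
      rw [solution_eq_sum, solution_alt_eq_sum graph N M h1 h2 hpre'.1 hpre'.2]
      simp only [runsC_slash "-" (by decide), runsC_slash "|" (by decide)]

-- ===== VERDICT (by name: the statement is the Claim_ definition above) =====
theorem solution_spec : Claim_equal_solution := by
  intro graph N M _ hpre
  unfold Spec_solution
  exact main_eq graph N M hpre
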